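-- pv_equiv track=rewrite | github.com/sxozuo/Hisoka | CommentCleaner.py | _fix_empty_blocks
-- ===== SOURCE A (Python) =====
-- def _fix_empty_blocks(code: str) -> str:
--     lines = code.split('\n')
--     result = []
--     i = 0
--     while i < len(lines):
--         line = lines[i]
--         result.append(line)
--         stripped = line.rstrip()
--         if stripped.endswith(':') and not stripped.lstrip().startswith('#'):
--             indent = len(line) - len(line.lstrip())
--             block_indent = indent + 4
--             j = i + 1
--             while j < len(lines) and lines[j].strip() == '':
--                 j += 1
--             if j >= len(lines) or (len(lines[j]) - len(lines[j].lstrip())) <= indent: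
--                 result.append(' ' * block_indent + 'pass')
--         i += 1
--     return '\n'.join(result)
-- ===== SOURCE B (Python) =====
-- def _fix_empty_blocks(code: str) -> str:
--     # Single reverse pass: next_indent holds the indent of the nearest
--     # non-blank line below (-1 sentinel past end of file, which compares
--     # <= any real indent), so no inner blank-skipping scan is needed.
--     lines = code.split('\n')
--     out = []
--     next_indent = -1
--     for line in reversed(lines):
--         stripped = line.rstrip()
--         indent = len(line) - len(line.lstrip())
--         if (stripped.endswith(':')
--                 and not stripped.lstrip().startswith('#')
--                 and next_indent <= indent):
--             out.append(' ' * (indent + 4) + 'pass')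
--         out.append(line)
--         if line.strip() != '':
--             next_indent = indent
--     out.reverse()
--     return '\n'.join(out)
-- ===== Notes on version B (the rewrite author's own statement) =====
-- stated objective: alternative
-- what changed: Replaces A's forward loop with a per-colon-line inner scan over following blank lines by a single reverse pass that carries the indent of the nearest non-blank line below (sentinel -1), building the output segments back-to-front.
import Mathlib
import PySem

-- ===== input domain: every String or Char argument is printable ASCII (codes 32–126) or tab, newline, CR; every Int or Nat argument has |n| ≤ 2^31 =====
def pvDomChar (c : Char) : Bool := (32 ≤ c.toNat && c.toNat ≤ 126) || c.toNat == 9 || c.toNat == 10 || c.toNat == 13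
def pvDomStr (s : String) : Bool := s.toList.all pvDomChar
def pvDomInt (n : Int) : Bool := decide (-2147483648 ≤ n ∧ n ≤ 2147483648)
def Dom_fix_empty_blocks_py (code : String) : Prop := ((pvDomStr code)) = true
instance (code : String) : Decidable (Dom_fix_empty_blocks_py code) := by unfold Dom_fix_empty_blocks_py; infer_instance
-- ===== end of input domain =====

-- B replaces A's forward loop with an inner blank-skipping lookahead per colon line
-- by one reverse pass carrying the indent of the nearest non-blank line below; objective: alternative.
-- Lines are handled as List Char (code points); split/join/strip are PySem.Chars, exact on this domain.

-- ' ' * (ind + 4) + 'pass'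
def pvPassLine (ind : Int) : List Char := List.replicate (ind + 4).toNat ' ' ++ ['p', 'a', 's', 's']

-- ===== PORT A =====
-- inner 'while j < len(lines) and lines[j].strip() == ""' lookahead plus the test after it
def pvA_scan (rest : List (List Char)) (ind : Int) : Bool :=
  match rest with
  | [] => true
  | r :: rs =>
    if PySem.Chars.strip r == [] then pvA_scan rs ind
    else decide (PySem.Chars.len r - PySem.Chars.len (PySem.Chars.lstrip r) ≤ ind)

-- the outer 'while i < len(lines)' loop, as structural recursion over the suffix of lines
def pvA_aux : List (List Char) → List (List Char)
  | [] => []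
  | l :: rest =>
    let stripped := PySem.Chars.rstrip l
    if PySem.Chars.endswith stripped [':'] && !(PySem.Chars.startswith (PySem.Chars.lstrip stripped) ['#']) then
      let ind := PySem.Chars.len l - PySem.Chars.len (PySem.Chars.lstrip l)
      if pvA_scan rest ind then l :: pvPassLine ind :: pvA_aux rest
      else l :: pvA_aux rest
    else l :: pvA_aux rest

def fix_empty_blocks_py (code : String) : String :=
  String.ofList (PySem.Chars.join ['\n'] (pvA_aux (PySem.Chars.splitOn code.toList ['\n'])))

-- ===== PORT B =====
-- one step of the loop over reversed(lines): state = (next_indent, out)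
def pvB_step (st : Int × List (List Char)) (line : List Char) : Int × List (List Char) :=
  let stripped := PySem.Chars.rstrip line
  let ind := PySem.Chars.len line - PySem.Chars.len (PySem.Chars.lstrip line)
  let out :=
    if PySem.Chars.endswith stripped [':'] && !(PySem.Chars.startswith (PySem.Chars.lstrip stripped) ['#'])
        && decide (st.1 ≤ ind) then
      st.2 ++ [pvPassLine ind, line]
    else st.2 ++ [line]
  (if PySem.Chars.strip line == [] then st.1 else ind, out)

def fix_empty_blocks_py_alt (code : String) : String :=
  let lines := PySem.Chars.splitOn code.toList ['\n']
  let st := lines.reverse.foldl pvB_step (-1, [])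
  String.ofList (PySem.Chars.join ['\n'] st.2.reverse)

-- ===== PRECONDITION & SPEC =====
def Spec_fix_empty_blocks_py (code : String) (out : String) : Prop := out = fix_empty_blocks_py_alt code
instance (code : String) (out : String) : Decidable (Spec_fix_empty_blocks_py code out) := by unfold Spec_fix_empty_blocks_py; infer_instance

-- ===== CLAIM (what is proved, stated in full; the proofs are below) =====
def Claim_equal_fix_empty_blocks_py : Prop := ∀ (code : String), Dom_fix_empty_blocks_py code → Spec_fix_empty_blocks_py code (fix_empty_blocks_py code)

-- ===== LEMMAS AND PROOFS =====

-- indent of the nearest non-blank line of a suffix, -1 if none (B's sentinel)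
def pvNNB : List (List Char) → Int
  | [] => -1
  | l :: ls =>
    if PySem.Chars.strip l == [] then pvNNB ls
    else PySem.Chars.len l - PySem.Chars.len (PySem.Chars.lstrip l)

theorem pv_ind_nonneg (l : List Char) :
    0 ≤ PySem.Chars.len l - PySem.Chars.len (PySem.Chars.lstrip l) := by
  have h := List.length_dropWhile_le (p := PySem.Chars.isspace) (l := l)
  simp [PySem.Chars.len, PySem.Chars.lstrip]
  omega

-- A's lookahead over a suffix answers exactly 'nearest non-blank indent ≤ ind'
theorem pv_scan_eq (rest : List (List Char)) (ind : Int) (h : 0 ≤ ind) :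
    pvA_scan rest ind = decide (pvNNB rest ≤ ind) := by
  induction rest with
  | nil => simp [pvA_scan, pvNNB]; omega
  | cons r rs ih =>
    simp only [pvA_scan, pvNNB]
    split <;> simp [ih]

-- B's step preserves the invariant relating its state to A's output on the suffix
theorem pv_step_eq (l : List Char) (rest : List (List Char)) :
    pvB_step (pvNNB rest, (pvA_aux rest).reverse) l = (pvNNB (l :: rest), (pvA_aux (l :: rest)).reverse) := by
  simp only [pvB_step, pvA_aux, pvNNB]
  rw [pv_scan_eq rest _ (pv_ind_nonneg l)]
  split_ifs <;> simp_all <;> omega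

theorem pv_fold_eq (lines : List (List Char)) :
    List.foldr (fun x y => pvB_step y x) (-1, []) lines = (pvNNB lines, (pvA_aux lines).reverse) := by
  induction lines with
  | nil => simp [pvA_aux, pvNNB]
  | cons l rest ih => rw [List.foldr_cons, ih]; exact pv_step_eq l rest

-- ===== VERDICT (by name: the statement is the Claim_ definition above) =====
theorem fix_empty_blocks_py_spec : Claim_equal_fix_empty_blocks_py := by
  intro code _
  unfold Spec_fix_empty_blocks_py fix_empty_blocks_py fix_empty_blocks_py_alt
  simp [pv_fold_eq]
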